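-- pv_equiv track=rewrite | github.com/Chris310103/alexa-vcfp-repro | src_/defense/buflo.py | _packet_chunks
-- ===== SOURCE A (Python) =====
-- from typing import List, Dict, Any, Tuple
--
-- def _packet_chunks(size: int, d: int) -> List[int]:
--     """
--     Split one real packet of 'size' bytes into chunks of size d.
--     Returned list contains the REAL payload bytes carried by each emitted packet.
--     Example: size=2300, d=1000 -> [1000, 1000, 300]
--     """
--     if size <= 0:
--         return []
--
--     chunks = []
--     left = size
--     while left > 0:
--         take = min(left, d)
--         chunks.append(take)
--         left -= take
--     return chunks
-- ===== SOURCE B (Python) =====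
-- from typing import List
--
-- def _packet_chunks(size: int, d: int) -> List[int]:
--     if size <= 0:
--         return []
--     q, rem = divmod(size, d)
--     return [d] * q + ([rem] if rem else [])
-- ===== Notes on version B (the rewrite author's own statement) =====
-- stated objective: simpler
-- what changed: Replaced the repeated-subtraction while loop by a closed-form divmod: size//d full chunks of d plus the nonzero remainder.
import Mathlib
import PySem

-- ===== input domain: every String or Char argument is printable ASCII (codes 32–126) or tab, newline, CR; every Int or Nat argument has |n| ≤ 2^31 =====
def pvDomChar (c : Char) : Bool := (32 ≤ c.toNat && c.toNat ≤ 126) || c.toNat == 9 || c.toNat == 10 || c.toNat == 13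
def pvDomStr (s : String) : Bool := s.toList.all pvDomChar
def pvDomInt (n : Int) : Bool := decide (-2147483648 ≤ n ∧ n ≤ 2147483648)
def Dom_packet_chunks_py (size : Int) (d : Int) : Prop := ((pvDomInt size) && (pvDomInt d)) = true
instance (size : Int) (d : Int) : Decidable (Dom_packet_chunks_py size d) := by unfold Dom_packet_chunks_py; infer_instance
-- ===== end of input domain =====

-- B replaces A's repeated-subtraction while loop by a closed-form divmod (simpler).

-- ===== PORT A =====
-- while left > 0: take = min(left, d); chunks.append(take); left -= take
-- ported as structural recursion with a fuel bound (size.toNat suffices on Pre_: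
-- with d > 0 each iteration removes at least 1 from left).
def packetChunksLoop (d : Int) (left : Int) : Nat → List Int
  | 0 => []
  | n + 1 =>
    if left > 0 then min left d :: packetChunksLoop d (left - min left d) n
    else []

def packet_chunks_py (size : Int) (d : Int) : List Int :=
  if size ≤ 0 then []
  else packetChunksLoop d size size.toNat

-- ===== PORT B =====
def packet_chunks_py_alt (size : Int) (d : Int) : List Int :=
  if size ≤ 0 then []
  else
    match PySem.Int.divmod? size d with
    | none => []  -- divmod raises for d = 0; excluded by Pre_
    | some (q, rem) =>
        List.replicate q.toNat d ++ (if rem ≠ 0 then [rem] else [])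

-- ===== PRECONDITION & SPEC =====
-- Pre_ excludes size > 0 with d ≤ 0: there A's while loop never terminates
-- (take = min(left,d) ≤ 0), so A returns on exactly the inputs Pre_ admits.
def Pre_packet_chunks_py (size : Int) (d : Int) : Prop := size ≤ 0 ∨ 0 < d
instance (size : Int) (d : Int) : Decidable (Pre_packet_chunks_py size d) := by
  unfold Pre_packet_chunks_py; infer_instance

def pvWitness_packet_chunks_py : Int × Int := (2300, 1000)

def Spec_packet_chunks_py (size : Int) (d : Int) (out : List Int) : Prop := out = packet_chunks_py_alt size d
instance (size : Int) (d : Int) (out : List Int) : Decidable (Spec_packet_chunks_py size d out) := by unfold Spec_packet_chunks_py; infer_instance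

-- ===== CLAIM (what is proved, stated in full; the proofs are below) =====
def Claim_equal_packet_chunks_py : Prop := ∀ (size : Int) (d : Int), Dom_packet_chunks_py size d → Pre_packet_chunks_py size d → Spec_packet_chunks_py size d (packet_chunks_py size d)

-- ===== LEMMAS AND PROOFS =====

-- The loop computes the closed form: size/d chunks of d plus the nonzero remainder.
lemma packetChunksLoop_closed (d : Int) (hd : 0 < d) :
    ∀ (fuel : Nat) (left : Int), 0 ≤ left → left.toNat ≤ fuel →
      packetChunksLoop d left fuel =
        List.replicate (left / d).toNat d ++ (if left % d ≠ 0 then [left % d] else []) := by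
  intro fuel
  induction fuel with
  | zero =>
      intro left h0 hf
      have hl : left = 0 := by omega
      subst hl
      simp [packetChunksLoop]
  | succ n ih =>
      intro left h0 hf
      by_cases hpos : left > 0
      · rw [packetChunksLoop, if_pos hpos]
        by_cases hld : left ≤ d
        · -- last iteration: take = left, loop ends
          rw [min_eq_left hld]
          have hstop : left - left = 0 := by omega
          rw [hstop]
          by_cases heq : left = d
          · subst heq
            have h1 : left / left = 1 := Int.ediv_self (by omega)
            cases n <;> simp [packetChunksLoop, h1]

          · have hlt : left < d := lt_of_le_of_ne hld heq
            have h1 : left / d = 0 := Int.ediv_eq_zero_of_lt h0 hlt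
            have h2 : left % d = left := Int.emod_eq_of_lt h0 hlt
            cases n <;> simp [packetChunksLoop, h1, h2] <;> omega
        · -- take = d, recurse on left - d
          rw [min_eq_right (by omega : d ≤ left)]
          rw [ih (left - d) (by omega) (by omega)]
          have hdiv : (left - d) / d = left / d - 1 := by
            have := Int.add_mul_ediv_right left (-1) (by omega : d ≠ 0)
            simpa [sub_eq_add_neg, neg_mul, one_mul] using this
          have hmod : (left - d) % d = left % d := by
            simp [sub_eq_add_neg]
          have hq : 0 ≤ (left - d) / d := Int.ediv_nonneg (by omega) (by omega)
          have hnat : (left / d).toNat = ((left - d) / d).toNat + 1 := by omega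
          rw [hdiv, hmod] at *
          rw [hnat, List.replicate_succ, List.cons_append]
      · have hl : left = 0 := by omega
        subst hl
        simp [packetChunksLoop]

-- ===== VERDICT (by name: the statement is the Claim_ definition above) =====
theorem packet_chunks_py_spec : Claim_equal_packet_chunks_py := by
  intro size d _ hpre
  unfold Spec_packet_chunks_py packet_chunks_py packet_chunks_py_alt
  by_cases hs : size ≤ 0
  · simp [hs]
  · have hd : 0 < d := by rcases hpre with h | h <;> omega
    rw [if_neg hs, if_neg hs]
    rw [packetChunksLoop_closed d hd size.toNat size (by omega) (le_refl _)]
    have hdm : PySem.Int.divmod? size d = some (size / d, size % d) := by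
      simp only [PySem.Int.divmod?, if_neg (by omega : ¬ d = 0),
        Int.fdiv_eq_ediv_of_nonneg _ (le_of_lt hd)]
      simp [Int.fmod_eq_emod, le_of_lt hd]
    rw [hdm]
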